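-- pv_equiv track=rewrite | github.com/darktxt/super_gongwen_agent | structured_output_repair.py | _extract_error_payload
-- ===== SOURCE A (Python) =====
-- def _extract_error_payload(text: str) -> str:
--     normalized = str(text or "").strip()
--     marker = "Invalid JSON when parsing"
--     if marker in normalized:
--         normalized = normalized.split(marker, 1)[1].strip()
--     for token in (
--         " for TypeAdapter(",
--         "\n    For further information",
--         "\r\n    For further information",
--         "\n  Input should be ",
--         "\r\n  Input should be ",
--     ):
--         if token in normalized:
--             normalized = normalized.split(token, 1)[0].strip()
--     return normalized
-- ===== SOURCE B (Python) =====
-- _MARKER = "Invalid JSON when parsing"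
--
-- _TOKENS = (
--     " for TypeAdapter(",
--     "\n    For further information",
--     "\r\n    For further information",
--     "\n  Input should be ",
--     "\r\n  Input should be ",
-- )
--
--
-- def _cut(s, tokens):
--     if not tokens:
--         return s
--     i = s.find(tokens[0])
--     return _cut(s if i == -1 else s[:i].strip(), tokens[1:])
--
--
-- def _extract_error_payload(text: str) -> str:
--     s = (text or "").strip()
--     i = s.find(_MARKER)
--     if i != -1:
--         s = s[i + len(_MARKER):].strip()
--     return _cut(s, _TOKENS)
-- ===== Notes on version B (the rewrite author's own statement) =====
-- stated objective: alternative
-- what changed: The mutate-and-split loop is replaced by a recursion over the token list that locates each cut point with str.find and slices once, and the marker split becomes a find plus a single slice; sequential cutting order (and the intermediate strips) is kept because it is observable on overlapping tokens.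
import Mathlib
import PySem

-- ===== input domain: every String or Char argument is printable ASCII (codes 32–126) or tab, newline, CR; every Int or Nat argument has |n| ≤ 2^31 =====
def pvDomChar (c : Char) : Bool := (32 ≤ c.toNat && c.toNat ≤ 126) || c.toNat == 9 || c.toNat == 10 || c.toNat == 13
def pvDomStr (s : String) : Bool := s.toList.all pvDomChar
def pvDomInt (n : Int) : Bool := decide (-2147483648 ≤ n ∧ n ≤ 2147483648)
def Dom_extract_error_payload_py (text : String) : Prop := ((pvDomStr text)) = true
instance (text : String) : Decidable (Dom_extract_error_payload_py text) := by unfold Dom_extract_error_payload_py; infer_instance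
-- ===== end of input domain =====

-- B keeps A's sequential token cuts but replaces the mutate-and-split loop by a find/slice recursion over the token list (objective: alternative decomposition).

-- ===== PORT A =====
-- the loop body of A: if token in n: n = n.split(token, 1)[0].strip()
-- (token is a nonempty literal, so split(token, 1) is Chars.splitOnMax n token 1; inside the
--  branch the split has two parts, so the .getD [] default of the [0] lookup is never taken)
def pvStepA (n : List Char) (token : List Char) : List Char :=
  if PySem.Chars.isIn token n then
    PySem.Chars.strip ((PySem.List.pyGet? (PySem.Chars.splitOnMax n token 1) 0).getD [])
  else n

def extract_error_payload_py (text : String) : String :=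
  -- str(text or "").strip(): for a str argument, `text or ""` is "" when text is empty and text otherwise
  let normalized0 := PySem.Chars.strip (if text.toList.isEmpty then [] else text.toList)
  let marker := "Invalid JSON when parsing".toList
  -- if marker in normalized: normalized = normalized.split(marker, 1)[1].strip()
  let normalized1 :=
    if PySem.Chars.isIn marker normalized0 then
      PySem.Chars.strip ((PySem.List.pyGet? (PySem.Chars.splitOnMax normalized0 marker 1) 1).getD [])
    else normalized0
  String.ofList (([" for TypeAdapter(".toList,
               "\n    For further information".toList,
               "\r\n    For further information".toList,
               "\n  Input should be ".toList,
               "\r\n  Input should be ".toList]).foldl pvStepA normalized1)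

-- ===== PORT B =====
def pvMarkerB : List Char := "Invalid JSON when parsing".toList

def pvTokensB : List (List Char) :=
  [" for TypeAdapter(".toList,
   "\n    For further information".toList,
   "\r\n    For further information".toList,
   "\n  Input should be ".toList,
   "\r\n  Input should be ".toList]

-- _cut(s, tokens): recursion over the token list, cutting at s.find(token) when found
def pvCut : List Char → List (List Char) → List Char
  | s, [] => s
  | s, t :: ts =>
      let i := PySem.Chars.find s t
      pvCut (if i = -1 then s else PySem.Chars.strip (PySem.List.slice s none (some i))) ts

def extract_error_payload_py_alt (text : String) : String :=
  let s0 := PySem.Chars.strip (if text.toList.isEmpty then [] else text.toList)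
  let i := PySem.Chars.find s0 pvMarkerB
  let s1 := if i = -1 then s0
            else PySem.Chars.strip (PySem.List.slice s0 (some (i + (PySem.Chars.len pvMarkerB : Int))) none)
  String.ofList (pvCut s1 pvTokensB)

-- ===== PRECONDITION & SPEC =====
def Spec_extract_error_payload_py (text : String) (out : String) : Prop := out = extract_error_payload_py_alt text
instance (text : String) (out : String) : Decidable (Spec_extract_error_payload_py text out) := by unfold Spec_extract_error_payload_py; infer_instance

-- ===== CLAIM (what is proved, stated in full; the proofs are below) =====
def Claim_equal_extract_error_payload_py : Prop := ∀ (text : String), Dom_extract_error_payload_py text → Spec_extract_error_payload_py text (extract_error_payload_py text)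

-- ===== LEMMAS AND PROOFS =====

theorem pv_find_eq (s sub : List Char) (j : Nat)
    (hj : sub <+: s.drop j) (hmin : ∀ i < j, ¬ sub <+: s.drop i) :
    PySem.Chars.find s sub = (j : Int) := by
  have hin : PySem.Chars.isIn sub s = true :=
    (PySem.Chars.exists_prefix_drop_iff_isIn sub s).mp ⟨j, hj⟩
  have hnn : 0 ≤ PySem.Chars.find s sub := by
    rw [PySem.Chars.find_nonneg_iff, ← PySem.Chars.isIn_iff_infix]; exact hin
  obtain ⟨hpre, hm⟩ := PySem.Chars.find_spec hnn
  set k := (PySem.Chars.find s sub).toNat with hk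
  have : k = j := by
    rcases lt_trichotomy k j with h | h | h
    · exact absurd hpre (hmin k h)
    · exact h
    · exact absurd hj (hm j h)
  omega

theorem pv_go_zero (sep : List Char) (fuel : Nat) (l cur : List Char) (acc : List (List Char)) :
    PySem.Chars.splitOnMax.go sep fuel 0 l cur acc = ((cur.reverse ++ l) :: acc).reverse := by
  cases fuel <;> cases l <;> simp [PySem.Chars.splitOnMax.go]

theorem pv_go_one (sep : List Char) (hsep : sep ≠ []) :
    ∀ (fuel : Nat) (l cur : List Char) (acc : List (List Char)), l.length < fuel →
    PySem.Chars.splitOnMax.go sep fuel 1 l cur acc =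
      if PySem.Chars.isIn sep l then
        acc.reverse ++ [cur.reverse ++ l.take (PySem.Chars.find l sep).toNat,
                        l.drop ((PySem.Chars.find l sep).toNat + sep.length)]
      else acc.reverse ++ [cur.reverse ++ l] := by
  intro fuel
  induction fuel with
  | zero => intro l cur acc h; omega
  | succ f ih =>
    intro l cur acc h
    cases l with
    | nil =>
      have : PySem.Chars.isIn sep [] = false := by
        rw [PySem.Chars.isIn_eq_false_iff]
        intro hx; exact hsep (by simpa using hx)
      simp [PySem.Chars.splitOnMax.go, this]
    | cons c rest =>
      by_cases hp : sep.isPrefixOf (c :: rest)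
      · have hpre : sep <+: (c :: rest) := List.isPrefixOf_iff_prefix.mp hp
        have hfind : PySem.Chars.find (c :: rest) sep = 0 :=
          pv_find_eq _ _ 0 (by simpa using hpre) (by omega)
        have hin : PySem.Chars.isIn sep (c :: rest) = true := by
          rw [PySem.Chars.isIn_iff_infix]; exact hpre.isInfix
        simp only [PySem.Chars.splitOnMax.go, hp, if_true]
        rw [pv_go_zero]
        simp [hin, hfind]
      · have hp' : ¬ sep <+: (c :: rest) := fun hx => hp (List.isPrefixOf_iff_prefix.mpr hx)
        have step : PySem.Chars.splitOnMax.go sep (f+1) 1 (c :: rest) cur acc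
            = PySem.Chars.splitOnMax.go sep f 1 rest (c :: cur) acc := by
          simp [PySem.Chars.splitOnMax.go, hp]
        rw [step, ih rest (c :: cur) acc (by simpa using Nat.lt_of_succ_lt_succ h)]
        by_cases hin : PySem.Chars.isIn sep rest = true
        · have hnn : 0 ≤ PySem.Chars.find rest sep := by
            rw [PySem.Chars.find_nonneg_iff, ← PySem.Chars.isIn_iff_infix]; exact hin
          obtain ⟨hpre, hm⟩ := PySem.Chars.find_spec hnn
          set j := (PySem.Chars.find rest sep).toNat with hj
          have hfind : PySem.Chars.find (c :: rest) sep = ((j+1 : Nat) : Int) := by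
            apply pv_find_eq
            · simpa using hpre
            · intro i hi
              cases i with
              | zero => simpa using hp'
              | succ i' => simpa using hm i' (by omega)
          have hin' : PySem.Chars.isIn sep (c :: rest) = true := by
            rw [PySem.Chars.isIn_iff_infix]
            rw [PySem.Chars.isIn_iff_infix] at hin
            obtain ⟨u, v, e⟩ := hin
            exact ⟨c :: u, v, by simp [← e]⟩
          have harith : j + 1 + sep.length = (j + sep.length) + 1 := by omega
          simp [hin, hin', hfind, harith]
        · have hinf : PySem.Chars.isIn sep rest = false := by simpa using hin
          have hnotin : PySem.Chars.isIn sep (c :: rest) = false := by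
            rw [PySem.Chars.isIn_eq_false_iff, List.infix_cons_iff]
            push Not
            exact ⟨hp', (PySem.Chars.isIn_eq_false_iff sep rest).mp hinf⟩
          simp [hinf, hnotin]

theorem pv_splitOnMax_one (s sep : List Char) (hsep : sep ≠ []) :
    PySem.Chars.splitOnMax s sep 1 =
      if PySem.Chars.isIn sep s then
        [s.take (PySem.Chars.find s sep).toNat,
         s.drop ((PySem.Chars.find s sep).toNat + sep.length)]
      else [s] := by
  rw [PySem.Chars.splitOnMax]
  rw [if_neg (by omega)]
  have h1 : Int.toNat 1 = 1 := rfl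
  rw [h1, pv_go_one sep hsep (s.length + 1) s [] [] (by omega)]
  split <;> simp

theorem pv_step_eq (n t : List Char) (ht : t ≠ []) :
    pvStepA n t =
      (if PySem.Chars.find n t = -1 then n
       else PySem.Chars.strip (PySem.List.slice n none (some (PySem.Chars.find n t)))) := by
  unfold pvStepA
  by_cases hin : PySem.Chars.isIn t n = true
  · have hne : PySem.Chars.find n t ≠ -1 := by
      rw [PySem.Chars.find_ne_neg_one_iff, ← PySem.Chars.isIn_iff_infix]; exact hin
    have hnn : 0 ≤ PySem.Chars.find n t := by
      rw [PySem.Chars.find_nonneg_iff, ← PySem.Chars.isIn_iff_infix]; exact hin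
    rw [if_pos hin, if_neg hne, pv_splitOnMax_one n t ht, if_pos hin,
        PySem.List.slice_to n hnn]
    simp [PySem.List.pyGet?, PySem.List.pyIdx?]
  · have hfa : PySem.Chars.find n t = -1 := by
      rw [PySem.Chars.find_eq_neg_one_iff, ← PySem.Chars.isIn_eq_false_iff]
      simpa using hin
    simp [hin, hfa]

theorem pv_fold_eq (ts : List (List Char)) (hts : ∀ t ∈ ts, t ≠ []) :
    ∀ s, ts.foldl pvStepA s = pvCut s ts := by
  induction ts with
  | nil => intro s; simp [pvCut]
  | cons t ts ih =>
    intro s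
    rw [List.foldl_cons, pv_step_eq s t (hts t (by simp))]
    rw [ih (fun u hu => hts u (by simp [hu]))]
    rfl

theorem pv_marker_eq (n m : List Char) (hm : m ≠ []) :
    (if PySem.Chars.isIn m n then
        PySem.Chars.strip ((PySem.List.pyGet? (PySem.Chars.splitOnMax n m 1) 1).getD [])
      else n)
    = (if PySem.Chars.find n m = -1 then n
       else PySem.Chars.strip
            (PySem.List.slice n (some (PySem.Chars.find n m + (PySem.Chars.len m : Int))) none)) := by
  by_cases hin : PySem.Chars.isIn m n = true
  · have hne : PySem.Chars.find n m ≠ -1 := by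
      rw [PySem.Chars.find_ne_neg_one_iff, ← PySem.Chars.isIn_iff_infix]; exact hin
    have hnn : 0 ≤ PySem.Chars.find n m := by
      rw [PySem.Chars.find_nonneg_iff, ← PySem.Chars.isIn_iff_infix]; exact hin
    have hlen : (PySem.Chars.len m : Int) = (m.length : Int) := by
      simp [PySem.Chars.len_eq]
    rw [if_pos hin, if_neg hne, pv_splitOnMax_one n m hm, if_pos hin,
        PySem.List.slice_from n (by omega), hlen]
    have htn : (PySem.Chars.find n m + (m.length : Int)).toNat
        = (PySem.Chars.find n m).toNat + m.length := by omega
    rw [htn]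
    simp [PySem.List.pyGet?, PySem.List.pyIdx?]
  · have hfa : PySem.Chars.find n m = -1 := by
      rw [PySem.Chars.find_eq_neg_one_iff, ← PySem.Chars.isIn_eq_false_iff]
      simpa using hin
    simp [hin, hfa]

-- ===== VERDICT (by name: the statement is the Claim_ definition above) =====
theorem extract_error_payload_py_spec : Claim_equal_extract_error_payload_py := by
  intro text _
  unfold Spec_extract_error_payload_py extract_error_payload_py extract_error_payload_py_alt
        pvMarkerB pvTokensB
  simp only []
  rw [pv_marker_eq _ _ (by decide)]
  rw [pv_fold_eq _ (by decide) _]
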